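-- pv_equiv track=rewrite | github.com/BrendonGeoffrinTanner/thermodynamics-of-diluted-spin-systems | Reseau 2D/Triangulaire/triangle_cluster_opti.py | get_liaisons
-- ===== SOURCE A (Python) =====
-- def neighbors(p):
--     x, y = p
--     if y % 2 == 0:
--         return [(x+1, y), (x-1, y),
--                 (x, y+1), (x, y-1),
--                 (x-1, y+1), (x-1, y-1)]
--     else:
--         return [(x+1, y), (x-1, y),
--                 (x, y+1), (x, y-1),
--                 (x+1, y+1), (x+1, y-1)]
--
-- def get_liaisons(cluster):
--     # Calcule les liaisons internes entre les points du cluster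
--     cluster = list(cluster)
--     index_map = {pt: i for i, pt in enumerate(cluster)}  # Associe un index à chaque point
--     liaisons = set()
--     for i, pt in enumerate(cluster):
--         for nb in neighbors(pt):
--             if nb in index_map:
--                 j = index_map[nb]
--                 if i < j:
--                     liaisons.add((i, j))  # Évite les doublons en imposant i < j
--     return sorted(liaisons)
-- ===== SOURCE B (Python) =====
-- def _adjacent(p, q):
--     # geometric test: q is one of p's six triangular-lattice neighbors
--     dx = q[0] - p[0]
--     dy = q[1] - p[1]
--     if dy == 0:
--         return abs(dx) == 1
--     if dy == 1 or dy == -1: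
--         return dx == 0 or dx == (-1 if p[1] % 2 == 0 else 1)
--     return False
--
-- def get_liaisons(cluster):
--     pts = list(cluster)
--     n = len(pts)
--     edges = []
--     for i in range(n):
--         for j in range(i + 1, n):
--             if _adjacent(pts[i], pts[j]):
--                 edges.append((i, j))
--     return edges
-- ===== Notes on version B (the rewrite author's own statement) =====
-- stated objective: alternative
-- what changed: B drops A's point-to-index hash map, dedup set and final sort entirely: it brute-force scans all index pairs i<j in lexicographic order and keeps (i,j) when a purely geometric O(1) adjacency test on the two coordinates holds, emitting the result already sorted and duplicate-free.
-- outside the precondition, e.g. on get_liaisons([(1, 0), (0, 0), (0, 0)]): A returns [(0, 2)], B returns [(0, 1), (0, 2)]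
import Mathlib
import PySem

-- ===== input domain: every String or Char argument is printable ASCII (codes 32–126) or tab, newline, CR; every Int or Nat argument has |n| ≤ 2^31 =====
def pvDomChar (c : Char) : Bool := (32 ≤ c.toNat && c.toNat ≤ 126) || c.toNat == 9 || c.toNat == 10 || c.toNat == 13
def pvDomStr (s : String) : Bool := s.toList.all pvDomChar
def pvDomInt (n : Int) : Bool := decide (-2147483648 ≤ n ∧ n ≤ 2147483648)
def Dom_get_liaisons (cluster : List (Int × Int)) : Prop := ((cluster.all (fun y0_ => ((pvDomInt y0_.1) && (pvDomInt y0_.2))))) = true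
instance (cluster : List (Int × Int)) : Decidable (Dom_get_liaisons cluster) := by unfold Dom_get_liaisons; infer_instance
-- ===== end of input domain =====

-- B replaces A's hash-map neighbor scan + dedup set + sort with a brute-force scan over all
-- index pairs i<j using a constant-time geometric adjacency test, emitting the pairs already
-- in sorted order (alternative: different algorithm, quadratic instead of hashed).

-- ===== PORT A =====
def neighbors (p : Int × Int) : List (Int × Int) :=
  let x := p.1
  let y := p.2
  if PySem.Int.mod y 2 = 0 then
    [(x+1, y), (x-1, y), (x, y+1), (x, y-1), (x-1, y+1), (x-1, y-1)]
  else
    [(x+1, y), (x-1, y), (x, y+1), (x, y-1), (x+1, y+1), (x+1, y-1)]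

def get_liaisons (cluster : List (Int × Int)) : List (Int × Int) :=
  let index_map : PySem.Dict (Int × Int) Int :=
    (PySem.List.enumerate cluster).foldl (fun d ip => d.insert ip.2 ip.1) PySem.Dict.empty
  let liaisons : PySem.Set (Int × Int) :=
    (PySem.List.enumerate cluster).foldl (fun s ip =>
      (neighbors ip.2).foldl (fun s nb =>
        match index_map.get? nb with
        | some j => if ip.1 < j then PySem.Set.add s (ip.1, j) else s
        | none => s) s) PySem.Set.empty
  PySem.List.sorted2 liaisons (·.1) (·.2)

-- ===== PORT B =====
def pyAdjacent (p q : Int × Int) : Bool :=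
  let dx := q.1 - p.1
  let dy := q.2 - p.2
  if dy = 0 then |dx| == 1
  else if dy = 1 ∨ dy = -1 then
    dx == 0 || dx == (if PySem.Int.mod p.2 2 = 0 then -1 else 1)
  else false

def get_liaisons_alt (cluster : List (Int × Int)) : List (Int × Int) :=
  let pts := cluster
  let n := PySem.List.len pts
  (PySem.List.pyRange 0 n 1).foldl (fun edges i =>
    (PySem.List.pyRange (i+1) n 1).foldl (fun edges j =>
      if pyAdjacent (PySem.List.pyGetD pts i (0,0)) (PySem.List.pyGetD pts j (0,0))
      then edges ++ [(i, j)] else edges) edges) []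

-- ===== PRECONDITION & SPEC =====
-- Pre_ excludes clusters that repeat a point: there A's result depends on the accidental
-- dict-overwrite order (each edge is keyed by the LAST index of the neighboring point while
-- the i<j test uses every index), a corner no caller of a cluster routine would specify.
def Pre_get_liaisons (cluster : List (Int × Int)) : Prop := cluster.Nodup
instance (cluster : List (Int × Int)) : Decidable (Pre_get_liaisons cluster) := by unfold Pre_get_liaisons; infer_instance

def pvWitness_get_liaisons : (List (Int × Int)) := [(0, 0), (1, 0), (0, 1)]

def Spec_get_liaisons (cluster : List (Int × Int)) (out : List (Int × Int)) : Prop := out = get_liaisons_alt cluster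
instance (cluster : List (Int × Int)) (out : List (Int × Int)) : Decidable (Spec_get_liaisons cluster out) := by unfold Spec_get_liaisons; infer_instance

-- ===== CLAIM (what is proved, stated in full; the proofs are below) =====
def Claim_equal_get_liaisons : Prop := ∀ (cluster : List (Int × Int)), Dom_get_liaisons cluster → Pre_get_liaisons cluster → Spec_get_liaisons cluster (get_liaisons cluster)

-- ===== LEMMAS AND PROOFS =====

-- a fold whose step has a "kept or contributed" membership characterization
theorem pv_mem_foldl_of_stepP {β : Type} (l : List β)
    (f : PySem.Set (Int × Int) → β → PySem.Set (Int × Int)) (P : β → (Int × Int) → Prop)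
    (hstep : ∀ s b p, p ∈ f s b ↔ p ∈ s ∨ P b p) (s : PySem.Set (Int × Int)) (p : Int × Int) :
    p ∈ l.foldl f s ↔ p ∈ s ∨ ∃ b ∈ l, P b p := by
  induction l generalizing s with
  | nil => simp
  | cons c t ih =>
    rw [List.foldl_cons, ih, hstep]
    constructor
    · rintro ((h | h) | ⟨b, hb, hP⟩)
      · exact Or.inl h
      · exact Or.inr ⟨c, List.mem_cons_self, h⟩
      · exact Or.inr ⟨b, List.mem_cons_of_mem c hb, hP⟩
    · rintro (h | ⟨b, hb, hP⟩)
      · exact Or.inl (Or.inl h)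
      · rcases List.mem_cons.mp hb with rfl | hb
        · exact Or.inl (Or.inr hP)
        · exact Or.inr ⟨b, hb, hP⟩

-- a fold whose step preserves Nodup
theorem pv_nodup_foldl_of_step {β : Type} (l : List β)
    (f : PySem.Set (Int × Int) → β → PySem.Set (Int × Int))
    (hstep : ∀ s b, s.Nodup → (f s b).Nodup) (s : PySem.Set (Int × Int)) (hs : s.Nodup) :
    (l.foldl f s).Nodup := by
  induction l generalizing s with
  | nil => exact hs
  | cons c t ih => exact ih _ (hstep s c hs)

-- the dict {pt: i for i, pt in enumerate(cluster)} on a duplicate-free cluster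
theorem pv_dict_get (cluster : List (Int × Int)) (hnd : cluster.Nodup) (q : Int × Int) (j : Int) :
    ((PySem.List.enumerate cluster).foldl (fun d ip => d.insert ip.2 ip.1)
        PySem.Dict.empty).get? q = some j ↔
      ∃ k : Nat, ∃ h : k < cluster.length, cluster[k] = q ∧ j = (k : Int) := by
  induction cluster using List.reverseRecOn with
  | nil => simp [PySem.List.enumerate, PySem.Dict.get?_empty]
  | append_singleton xs a ih =>
    have hnd' : xs.Nodup := (List.nodup_append.mp hnd).1
    have hna : a ∉ xs := by
      have := (List.nodup_append.mp hnd).2.2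
      intro hm
      exact this a hm a (List.mem_singleton_self a) rfl
    rw [PySem.List.enumerate_append, List.foldl_append]
    simp only [PySem.List.enumerate, List.foldl_cons, List.foldl_nil, zero_add]
    rw [PySem.Dict.get?_insert]
    by_cases hq : q = a
    · subst hq
      rw [if_pos rfl]
      constructor
      · rintro h
        exact ⟨xs.length, by rw [List.length_append, List.length_singleton]; omega, by simp,
          by simpa using (Option.some_inj.mp h).symm⟩
      · rintro ⟨k, hk, hget, rfl⟩
        by_cases hkl : k < xs.length
        · exfalso
          apply hna
          rw [List.getElem_append_left hkl] at hget
          exact hget ▸ List.getElem_mem hkl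
        · have : k = xs.length := by
            rw [List.length_append, List.length_singleton] at hk; omega
          subst this
          simp
    · rw [if_neg hq, ih hnd']
      constructor
      · rintro ⟨k, hk, hget, rfl⟩
        exact ⟨k, by rw [List.length_append, List.length_singleton]; omega,
          by rw [List.getElem_append_left hk]; exact hget, rfl⟩
      · rintro ⟨k, hk, hget, rfl⟩
        have hk2 : k < xs.length + 1 := by
          have hk3 := hk
          simp only [List.length_append, List.length_singleton] at hk3
          omega
        have hkl : k < xs.length := by
          by_contra hge
          have ha : (xs ++ [a])[k]'hk = a := by
            rw [List.getElem_append_right (by omega)]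
            simp
          rw [ha] at hget
          exact hq hget.symm
        rw [List.getElem_append_left hkl] at hget
        exact ⟨k, hkl, hget, rfl⟩

-- geometry: B's O(1) coordinate test decides membership in A's six-neighbor list
theorem pv_adjacent_iff (p q : Int × Int) :
    pyAdjacent p q = true ↔ q ∈ neighbors p := by
  rcases p with ⟨x, y⟩
  rcases q with ⟨u, v⟩
  simp only [pyAdjacent, neighbors,
    PySem.Int.mod_eq_emod_of_pos (by omega : (0:Int) < 2)]
  by_cases hy : y % 2 = 0 <;>
    simp only [hy, if_true, if_false, List.mem_cons, List.not_mem_nil, or_false,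
      Prod.mk.injEq] <;>
    split_ifs with h1 h2 <;>
    simp only [beq_iff_eq, Bool.or_eq_true,
      abs_eq (by omega : (0 : Int) ≤ 1), false_iff, not_or] <;>
    omega

-- membership in A's liaison set
theorem pv_mem_A (cluster : List (Int × Int)) (hnd : cluster.Nodup) (p : Int × Int) :
    p ∈ (PySem.List.enumerate cluster).foldl (fun s ip =>
        (neighbors ip.2).foldl (fun s nb =>
          match ((PySem.List.enumerate cluster).foldl (fun d ip => d.insert ip.2 ip.1)
              PySem.Dict.empty).get? nb with
          | some j => if ip.1 < j then PySem.Set.add s (ip.1, j) else s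
          | none => s) s) PySem.Set.empty ↔
      ∃ i k : Nat, ∃ hi : i < cluster.length, ∃ hk : k < cluster.length,
        i < k ∧ cluster[k] ∈ neighbors cluster[i] ∧ p = ((i : Int), (k : Int)) := by
  rw [pv_mem_foldl_of_stepP _ _
    (fun ip p => ∃ nb ∈ neighbors ip.2, ∃ j : Int,
      ((PySem.List.enumerate cluster).foldl (fun d ip => d.insert ip.2 ip.1)
          PySem.Dict.empty).get? nb = some j ∧ ip.1 < j ∧ p = (ip.1, j))
    (fun s ip p => by
      rw [pv_mem_foldl_of_stepP _ _
        (fun nb p => ∃ j : Int,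
          ((PySem.List.enumerate cluster).foldl (fun d ip => d.insert ip.2 ip.1)
              PySem.Dict.empty).get? nb = some j ∧ ip.1 < j ∧ p = (ip.1, j))
        (fun s nb p => by
          cases hD : ((PySem.List.enumerate cluster).foldl (fun d ip => d.insert ip.2 ip.1)
              PySem.Dict.empty).get? nb with
          | none => simp [hD]
          | some j =>
            dsimp only
            split_ifs with hlt
            · simp only [PySem.Set.mem_add]
              constructor
              · rintro (h | h)
                · exact Or.inl h
                · exact Or.inr ⟨j, hD, hlt, h⟩
              · rintro (h | ⟨j', hj', hlt', rfl⟩)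
                · exact Or.inl h
                · have hjj : j = j' := Option.some_inj.mp (hD.symm.trans hj')
                  exact Or.inr (by rw [hjj])
            · constructor
              · exact fun h => Or.inl h
              · rintro (h | ⟨j', hj', hlt', rfl⟩)
                · exact h
                · have hjj : j = j' := Option.some_inj.mp (hD.symm.trans hj')
                  exact absurd hlt' (by rw [← hjj]; exact hlt)) s p])
    PySem.Set.empty p]
  simp only [List.not_mem_nil, false_or, PySem.Set.empty]
  constructor
  · rintro ⟨ip, hip, nb, hnb, j, hj, hlt, rfl⟩
    rcases (PySem.List.mem_enumerate_iff _ _ _).mp hip with ⟨i, hi, rfl⟩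
    rcases (pv_dict_get cluster hnd nb j).mp hj with ⟨k, hk, rfl, rfl⟩
    refine ⟨i, k, hi, hk, by exact_mod_cast (by simpa using hlt), by simpa using hnb, by simp⟩
  · rintro ⟨i, k, hi, hk, hik, hnb, rfl⟩
    refine ⟨(0 + (i : Int), cluster[i]), (PySem.List.mem_enumerate_iff _ _ _).mpr ⟨i, hi, rfl⟩,
      cluster[k], hnb, (k : Int), (pv_dict_get cluster hnd cluster[k] (k : Int)).mpr
        ⟨k, hk, rfl, rfl⟩, by simp; exact_mod_cast hik, by simp⟩

-- B's nested append loops are a lex-ordered flatMap/filter over the index pairs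
theorem pv_B_eq_flatMap (cluster : List (Int × Int)) :
    get_liaisons_alt cluster =
      (PySem.List.pyRange 0 (PySem.List.len cluster) 1).flatMap (fun i =>
        ((PySem.List.pyRange (i+1) (PySem.List.len cluster) 1).filter (fun j =>
          pyAdjacent (PySem.List.pyGetD cluster i (0,0)) (PySem.List.pyGetD cluster j (0,0)))).map
          (fun j => (i, j))) := by
  simp only [get_liaisons_alt]
  rw [show (fun (edges : List (Int × Int)) (i : Int) =>
        List.foldl (fun edges j =>
          if pyAdjacent (PySem.List.pyGetD cluster i (0,0)) (PySem.List.pyGetD cluster j (0,0))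
          then edges ++ [(i, j)] else edges) edges
          (PySem.List.pyRange (i+1) (PySem.List.len cluster) 1))
      = (fun (edges : List (Int × Int)) (i : Int) => edges ++
          ((PySem.List.pyRange (i+1) (PySem.List.len cluster) 1).filter (fun j =>
            pyAdjacent (PySem.List.pyGetD cluster i (0,0))
              (PySem.List.pyGetD cluster j (0,0)))).map (fun j => (i, j)))
      from funext fun edges => funext fun i => PySem.List.foldl_append_if _ _ _ _,
    PySem.List.foldl_append_eq_flatMap, List.nil_append]

-- membership in B's output list
theorem pv_mem_B (cluster : List (Int × Int)) (p : Int × Int) :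
    p ∈ get_liaisons_alt cluster ↔
      ∃ i k : Nat, ∃ hi : i < cluster.length, ∃ hk : k < cluster.length,
        i < k ∧ cluster[k] ∈ neighbors cluster[i] ∧ p = ((i : Int), (k : Int)) := by
  rw [pv_B_eq_flatMap]
  simp only [List.mem_flatMap, List.mem_map, List.mem_filter, PySem.List.mem_pyRange_one,
    PySem.List.len_eq]
  constructor
  · rintro ⟨i, ⟨hi0, hin⟩, j, ⟨⟨hji, hjn⟩, hadj⟩, rfl⟩
    have hj0 : (0:Int) ≤ j := by omega
    refine ⟨i.toNat, j.toNat, by omega, by omega, by omega, ?_, ?_⟩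
    · have hgi := PySem.List.pyGetD_eq_getElem cluster ((0,0) : Int × Int) hi0 hin
      have hgj := PySem.List.pyGetD_eq_getElem cluster ((0,0) : Int × Int) hj0 hjn
      rw [hgi, hgj] at hadj
      exact (pv_adjacent_iff _ _).mp hadj
    · simp [Int.toNat_of_nonneg hi0, Int.toNat_of_nonneg hj0]
  · rintro ⟨i, k, hi, hk, hik, hnb, rfl⟩
    refine ⟨(i : Int), ⟨by omega, by exact_mod_cast hi⟩, (k : Int),
      ⟨⟨by exact_mod_cast hik, by exact_mod_cast hk⟩, ?_⟩, rfl⟩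
    have hgi : PySem.List.pyGetD cluster (i : Int) (0,0) = cluster[i] := by
      rw [PySem.List.pyGetD_eq_getElem cluster ((0,0) : Int × Int) (by omega)
        (by exact_mod_cast hi)]
      simp
    have hgk : PySem.List.pyGetD cluster (k : Int) (0,0) = cluster[k] := by
      rw [PySem.List.pyGetD_eq_getElem cluster ((0,0) : Int × Int) (by omega)
        (by exact_mod_cast hk)]
      simp
    rw [hgi, hgk]
    exact (pv_adjacent_iff _ _).mpr hnb

-- B's output is strictly increasing in the lexicographic order
theorem pv_B_pairwise (cluster : List (Int × Int)) :
    (get_liaisons_alt cluster).Pairwise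
      (fun a b => (toLex a : Int ×ₗ Int) < toLex b) := by
  rw [pv_B_eq_flatMap]
  rw [List.pairwise_flatMap]
  constructor
  · intro i _
    refine List.Pairwise.map _ ?_ (List.Pairwise.filter _ (PySem.List.pairwise_lt_pyRange_one _ _))
    intro a b hab
    exact Prod.Lex.lt_iff.mpr (Or.inr ⟨rfl, hab⟩)
  · refine List.Pairwise.imp_of_mem ?_ (PySem.List.pairwise_lt_pyRange_one _ _)
    rintro a b ha hb hab x hx y hy
    simp only [List.mem_map, List.mem_filter] at hx hy
    rcases hx with ⟨_, _, rfl⟩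
    rcases hy with ⟨_, _, rfl⟩
    exact Prod.Lex.lt_iff.mpr (Or.inl hab)

-- Python's sorted on (Int, Int) tuples is sorting by the lexicographic key
theorem pv_sorted2_eq_sorted_lex (xs : List (Int × Int)) :
    PySem.List.sorted2 xs (·.1) (·.2) false =
      PySem.List.sorted xs (fun p => (toLex p : Int ×ₗ Int)) false := by
  rw [PySem.List.sorted_eq_foldl_insertBy]
  simp only [PySem.List.sorted2]
  have h : (fun (a b : Int × Int) =>
        (decide (a.1 < b.1) || (!decide (b.1 < a.1) && decide (a.2 < b.2)))) =
      (fun (a b : Int × Int) => decide ((toLex a : Int ×ₗ Int) < toLex b)) := by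
    funext a b
    have hl : ((toLex a : Int ×ₗ Int) < toLex b) ↔ (a.1 < b.1 ∨ a.1 = b.1 ∧ a.2 < b.2) :=
      Prod.Lex.lt_iff
    rcases lt_trichotomy a.1 b.1 with h1 | h1 | h1 <;>
      by_cases h2 : a.2 < b.2 <;>
      simp [hl, h1] <;> omega
  rw [h]
  simp

-- ===== VERDICT (by name: the statement is the Claim_ definition above) =====
theorem get_liaisons_spec : Claim_equal_get_liaisons := by
  intro cluster _ hnd
  unfold Spec_get_liaisons get_liaisons
  dsimp only
  rw [pv_sorted2_eq_sorted_lex]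
  refine PySem.List.sorted_eq_of_perm_of_pairwise_lt _ _ _ ?_ (pv_B_pairwise cluster)
  refine (List.perm_ext_iff_of_nodup ?_ ?_).mpr ?_
  · refine (pv_B_pairwise cluster).imp ?_
    intro a b h heq
    rw [heq] at h
    exact lt_irrefl _ h
  · refine pv_nodup_foldl_of_step _ _ ?_ _ List.nodup_nil
    intro s ip h
    refine pv_nodup_foldl_of_step _ _ ?_ _ h
    intro s' nb h'
    cases hD : ((PySem.List.enumerate cluster).foldl (fun d ip => d.insert ip.2 ip.1)
        PySem.Dict.empty).get? nb with
    | none => exact h'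
    | some j =>
      dsimp only
      split_ifs with hlt
      · exact PySem.Set.nodup_add _ _ h'
      · exact h'
  · intro a
    rw [pv_mem_A cluster hnd a, pv_mem_B cluster a]
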